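-- pv_equiv track=rewrite | github.com/pvital/4lg0rithm5 | super_reduced_string/reduced_string.py | haha
-- ===== SOURCE A (Python) =====
-- def haha(s):
--     i = 0
--     while (i < len(s)-1):
--         if (s[i] == s[i+1]):
--             i += 2
--         else:
--             yield s[i]
--             i += 1
--     if (i<len(s)):
--         yield s[len(s)-1]
-- ===== SOURCE B (Python) =====
-- def haha(s):
--     # run-length decomposition: split s into maximal runs of equal characters;
--     # a run of odd length yields one copy of its character, an even run yields nothing.
--     n = len(s)
--     i = 0
--     while i < n:
--         j = i
--         while j < n and s[j] == s[i]:
--             j += 1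
--         if (j - i) % 2:
--             yield s[i]
--         i = j
-- ===== Notes on version B (the rewrite author's own statement) =====
-- stated objective: alternative
-- what changed: Replaces the greedy adjacent-pair-cancelling index walk by a run-length decomposition: split s into maximal runs of equal characters and yield one copy of the run's character exactly for each odd-length run (pairs can only form inside a run and the scan always enters a run at its first character).
import Mathlib
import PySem

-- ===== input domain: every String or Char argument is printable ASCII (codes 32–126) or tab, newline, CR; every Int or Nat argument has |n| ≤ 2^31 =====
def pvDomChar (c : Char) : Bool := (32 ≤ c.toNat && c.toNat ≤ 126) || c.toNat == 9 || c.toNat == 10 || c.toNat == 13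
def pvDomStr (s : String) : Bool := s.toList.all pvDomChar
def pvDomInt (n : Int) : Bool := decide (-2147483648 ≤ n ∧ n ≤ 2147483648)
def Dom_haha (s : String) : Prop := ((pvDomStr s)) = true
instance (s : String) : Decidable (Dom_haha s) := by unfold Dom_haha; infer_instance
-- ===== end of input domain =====

-- B replaces A's greedy adjacent-pair-cancelling index walk by a run-length decomposition
-- (each maximal run of equal characters yields its character iff the run length is odd);
-- same asymptotic cost, a different algorithm (objective: alternative).

-- ===== PORT A =====
-- A's while-loop: index i walks the string, skipping 2 on an equal adjacent pair, else yielding s[i].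
def hahaLoopA (cs : List Char) (i : Nat) : List String :=
  if i < cs.length - 1 then
    if cs[i]! == cs[i+1]! then hahaLoopA cs (i+2)
    else String.ofList [cs[i]!] :: hahaLoopA cs (i+1)
  else if i < cs.length then [String.ofList [cs[cs.length - 1]!]]
  else []
termination_by cs.length - i

def haha (s : String) : List String := hahaLoopA s.toList 0

-- ===== PORT B =====
-- B's inner while: advance j while s[j] == s[i] (end of the maximal run starting at i).
def hahaRunEnd (cs : List Char) (i j : Nat) : Nat :=
  if j < cs.length ∧ cs[j]! == cs[i]! then hahaRunEnd cs i (j+1) else j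
termination_by cs.length - j
decreasing_by omega

-- termination helpers for hahaLoopB (cited by its decreasing_by)
theorem le_hahaRunEnd (cs : List Char) (i j : Nat) : j ≤ hahaRunEnd cs i j := by
  fun_induction hahaRunEnd cs i j with
  | case1 j h ih => omega
  | case2 j h => omega

theorem lt_hahaRunEnd_self (cs : List Char) (i : Nat) (h : i < cs.length) :
    i < hahaRunEnd cs i i := by
  rw [hahaRunEnd]
  have : (cs[i]! == cs[i]!) = true := by simp
  rw [if_pos ⟨h, this⟩]
  have := le_hahaRunEnd cs i (i+1)
  omega

-- B's outer while: for each maximal run [i, j), yield the run's char iff its length is odd.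
def hahaLoopB (cs : List Char) (i : Nat) : List String :=
  if h : i < cs.length then
    let j := hahaRunEnd cs i i
    (if (j - i) % 2 = 1 then [String.ofList [cs[i]!]] else []) ++ hahaLoopB cs j
  else []
termination_by cs.length - i
decreasing_by
  have := lt_hahaRunEnd_self cs i h
  omega

def haha_alt (s : String) : List String := hahaLoopB s.toList 0

-- ===== PRECONDITION & SPEC =====
def Spec_haha (s : String) (out : List String) : Prop := out = haha_alt s
instance (s : String) (out : List String) : Decidable (Spec_haha s out) := by unfold Spec_haha; infer_instance

-- ===== CLAIM (what is proved, stated in full; the proofs are below) =====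
def Claim_equal_haha : Prop := ∀ (s : String), Dom_haha s → Spec_haha s (haha s)

-- ===== LEMMAS AND PROOFS =====

-- proof-side reference: the yielded sequence as a structural recursion on the char list
def hahaAltL : List Char → List String
  | a :: b :: rest => if a == b then hahaAltL rest else String.ofList [a] :: hahaAltL (b :: rest)
  | [a] => [String.ofList [a]]
  | [] => []

-- ---- A's loop computes hahaAltL ----
theorem hahaLoopA_eq_drop (cs : List Char) (i : Nat) : hahaLoopA cs i = hahaAltL (cs.drop i) := by
  fun_induction hahaLoopA cs i with
  | case1 i h heq ih =>
    have h1 : i < cs.length := by omega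
    have h2 : i + 1 < cs.length := by omega
    rw [List.drop_eq_getElem_cons h1, List.drop_eq_getElem_cons h2]
    simp only [hahaAltL, ih]
    have e1 : cs[i]! = cs[i] := getElem!_pos cs i h1
    have e2 : cs[i+1]! = cs[i+1] := getElem!_pos cs (i+1) h2
    rw [e1, e2] at heq
    simp [heq]
  | case2 i h heq ih =>
    have h1 : i < cs.length := by omega
    have h2 : i + 1 < cs.length := by omega
    rw [List.drop_eq_getElem_cons h1]
    conv_rhs => rw [List.drop_eq_getElem_cons h2]
    have e1 : cs[i]! = cs[i] := getElem!_pos cs i h1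
    have e2 : cs[i+1]! = cs[i+1] := getElem!_pos cs (i+1) h2
    rw [e1, e2] at heq
    simp only [hahaAltL]
    rw [if_neg heq, e1, ih, List.drop_eq_getElem_cons h2]
  | case3 i h h2 =>
    have hi : i = cs.length - 1 := by omega
    subst hi
    rw [List.drop_eq_getElem_cons h2]
    have hnil : cs.drop (cs.length - 1 + 1) = [] := by
      apply List.drop_eq_nil_of_le; omega
    rw [hnil]
    simp only [hahaAltL]
    rw [getElem!_pos cs (cs.length - 1) h2]
  | case4 i h h2 =>
    have : cs.drop i = [] := by apply List.drop_eq_nil_of_le; omega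
    rw [this]; rfl

-- ---- properties of hahaRunEnd ----
theorem hahaRunEnd_le (cs : List Char) (i j : Nat) (h : j ≤ cs.length) :
    hahaRunEnd cs i j ≤ cs.length := by
  fun_induction hahaRunEnd cs i j with
  | case1 j h' ih => exact ih (by omega)
  | case2 j h' => omega

theorem hahaRunEnd_run (cs : List Char) (i j : Nat) :
    ∀ m, j ≤ m → m < hahaRunEnd cs i j → cs[m]! = cs[i]! := by
  fun_induction hahaRunEnd cs i j with
  | case1 j h' ih =>
    intro m hm1 hm2
    rcases Nat.eq_or_lt_of_le hm1 with he | hlt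
    · subst he; exact beq_iff_eq.mp h'.2
    · exact ih m hlt hm2
  | case2 j h' => intro m hm1 hm2; omega

theorem hahaRunEnd_stop (cs : List Char) (i j : Nat)
    (h : hahaRunEnd cs i j < cs.length) : ¬ cs[hahaRunEnd cs i j]! = cs[i]! := by
  fun_induction hahaRunEnd cs i j with
  | case1 j h' ih => exact ih h
  | case2 j h' =>
    intro he
    exact h' ⟨h, beq_iff_eq.mpr he⟩

-- ---- a segment of equal characters is a replicate ----
theorem drop_run (cs : List Char) (c : Char) :
    ∀ k i, i + k ≤ cs.length → (∀ m, i ≤ m → m < i + k → cs[m]! = c) →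
      cs.drop i = List.replicate k c ++ cs.drop (i + k) := by
  intro k
  induction k with
  | zero => intro i _ _; simp
  | succ k ih =>
    intro i hlen hall
    have hi : i < cs.length := by omega
    rw [List.drop_eq_getElem_cons hi]
    have hc : cs[i] = c := by
      rw [← getElem!_pos cs i hi]; exact hall i (le_refl i) (by omega)
    have hrest : cs.drop (i+1) = List.replicate k c ++ cs.drop (i+1+k) := by
      apply ih (i+1) (by omega)
      intro m hm1 hm2; exact hall m (by omega) (by omega)
    rw [hc, hrest]
    have : i + 1 + k = i + (k+1) := by omega
    rw [this]
    rfl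

-- ---- hahaAltL over a run followed by a non-matching rest ----
theorem hahaAltL_run (c : Char) (rest : List Char)
    (hrest : ∀ d, rest.head? = some d → ¬ d = c) :
    ∀ k, hahaAltL (List.replicate k c ++ rest) =
      (if k % 2 = 1 then [String.ofList [c]] else []) ++ hahaAltL rest := by
  intro k
  induction k using Nat.strong_induction_on with
  | _ k ih =>
    match k with
    | 0 => simp
    | 1 =>
      cases rest with
      | nil => simp [hahaAltL]
      | cons d t =>
        have hd : ¬ (c == d) = true := by
          simp only [beq_iff_eq]
          intro he; exact hrest d rfl he.symm
        simp only [List.replicate, List.cons_append, List.nil_append, hahaAltL]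
        rw [if_neg hd]
        simp
    | (k+2) =>
      have : List.replicate (k+2) c ++ rest = c :: c :: (List.replicate k c ++ rest) := by
        simp [List.replicate]
      rw [this]
      simp only [hahaAltL, beq_self_eq_true, if_true]
      rw [ih k (by omega)]
      have : (k + 2) % 2 = k % 2 := by omega
      rw [this]

-- ---- B's loop computes hahaAltL ----
theorem hahaLoopB_eq_drop (cs : List Char) (i : Nat) : hahaLoopB cs i = hahaAltL (cs.drop i) := by
  fun_induction hahaLoopB cs i with
  | case1 i h j ih =>
    have hj : j = hahaRunEnd cs i i := rfl
    rw [hj] at *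
    set j := hahaRunEnd cs i i with hjs
    have hij : i < j := lt_hahaRunEnd_self cs i h
    have hjl : j ≤ cs.length := hahaRunEnd_le cs i i (by omega)
    have hdrop : cs.drop i = List.replicate (j - i) cs[i]! ++ cs.drop j := by
      have := drop_run cs cs[i]! (j - i) i (by omega)
        (fun m hm1 hm2 => hahaRunEnd_run cs i i m hm1 (by omega))
      rwa [show i + (j - i) = j by omega] at this
    have hrest : ∀ d, (cs.drop j).head? = some d → ¬ d = cs[i]! := by
      intro d hd
      rw [List.head?_drop] at hd
      by_cases hjl2 : j < cs.length
      · rw [List.getElem?_eq_getElem hjl2] at hd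
        have : d = cs[j]! := by
          rw [getElem!_pos cs j hjl2]; exact (Option.some_inj.mp hd).symm
        rw [this]
        exact hahaRunEnd_stop cs i i hjl2
      · rw [List.getElem?_eq_none (by omega)] at hd; cases hd
    rw [hdrop, hahaAltL_run cs[i]! (cs.drop j) hrest (j - i), ih]
  | case2 i h =>
    have : cs.drop i = [] := by apply List.drop_eq_nil_of_le; omega
    rw [this]; rfl

-- ===== VERDICT (by name: the statement is the Claim_ definition above) =====
theorem haha_spec : Claim_equal_haha := by
  intro s _
  unfold Spec_haha haha haha_alt
  rw [hahaLoopA_eq_drop, hahaLoopB_eq_drop]
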